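-- pv_equiv track=rewrite | github.com/DvaMishkiLapa/SmallScripts | excel_to_other/com_cables_parser.py | esc_spec_symbols
-- ===== SOURCE A (Python) =====
-- def esc_spec_symbols(row_list):
--     output_row_list = row_list.copy()
--     spec_symbols_list = ["\\", "&", "{", "}", "#", "%"] # Список спец. символов, расширяемый
--     for i in range(len(output_row_list)):
--         for spec_symbol in spec_symbols_list:
--             ss_index = output_row_list[i].find(spec_symbol) # Вывод индекса спец. символа, поиск начинается с начала строки
--             while ss_index != -1: # -1: спец. символы не найдены
--                 output_row_list[i] = output_row_list[i][0:ss_index] + "\\" + output_row_list[i][ss_index:]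
--                 ss_index = output_row_list[i].find(spec_symbol, ss_index+2) # Поиск следующего спец. символа, поиск начинается после прошлого найденного (+2: \%)
--     return output_row_list
-- ===== SOURCE B (Python) =====
-- def esc_spec_symbols(row_list):
--     table = str.maketrans({c: "\\" + c for c in "\\&{}#%"})
--     return [s.translate(table) for s in row_list]
-- ===== Notes on version B (the rewrite author's own statement) =====
-- stated objective: faster
-- what changed: A's six sequential find-and-splice rescans per string are replaced by one translation table (str.maketrans) and a single table-driven character pass (str.translate) per string.
import Mathlib
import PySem

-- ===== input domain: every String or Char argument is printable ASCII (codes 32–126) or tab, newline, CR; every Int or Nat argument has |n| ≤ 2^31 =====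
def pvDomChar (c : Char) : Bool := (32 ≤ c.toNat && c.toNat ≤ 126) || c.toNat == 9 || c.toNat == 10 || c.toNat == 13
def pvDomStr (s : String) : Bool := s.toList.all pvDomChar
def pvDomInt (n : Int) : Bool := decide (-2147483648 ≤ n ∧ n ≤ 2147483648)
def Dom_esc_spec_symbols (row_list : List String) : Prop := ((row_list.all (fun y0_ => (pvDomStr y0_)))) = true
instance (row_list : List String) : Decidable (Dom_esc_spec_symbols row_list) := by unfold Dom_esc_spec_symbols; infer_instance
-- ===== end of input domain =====

-- B replaces A's per-symbol repeated find-and-splice rescans with one table-driven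
-- single pass over each string (idiomatic str.maketrans/translate); return value only
-- (both return a new list, neither mutates the argument).

-- ===== PORT A =====
-- inner `while ss_index != -1` loop of A for one symbol `sym`, state = (current string s, search start i);
-- `fuel` only bounds the recursion depth to make it total: the loop runs at most once per
-- character of the original string, so the initial fuel `s.length + 1` is never exhausted.
def escLoopA (fuel : Nat) (sym : List Char) (s : List Char) (i : Nat) : List Char :=
  match fuel with
  | 0 => s
  | fuel + 1 =>
    let j := PySem.Chars.findFrom s sym (i : Int) none
    if j = -1 then s
    else escLoopA fuel sym
      (PySem.List.slice s (some 0) (some j) ++ '\\' :: PySem.List.slice s (some j) none)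
      (j.toNat + 2)

-- literal port of A: copy the list, and for each row fold the six special symbols,
-- each symbol processed by the find/insert-backslash/find-from-(index+2) loop above.
def esc_spec_symbols (row_list : List String) : List String :=
  row_list.map (fun row =>
    String.ofList ([['\\'], ['&'], ['{'], ['}'], ['#'], ['%']].foldl
      (fun acc sym => escLoopA (acc.length + 1) sym acc 0) row.toList))

-- ===== PORT B =====
def pvSpecials : List Char := ['\\', '&', '{', '}', '#', '%']

-- the translation table of Source B: each special char maps to its backslash-prefixed pair
def pvTranslate (x : Char) : List Char := if x ∈ pvSpecials then ['\\', x] else [x]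

-- port of B: one table-driven pass (str.translate) over each string
def esc_spec_symbols_alt (row_list : List String) : List String :=
  row_list.map (fun row => String.ofList (row.toList.flatMap pvTranslate))

-- ===== PRECONDITION & SPEC =====
def Spec_esc_spec_symbols (row_list : List String) (out : List String) : Prop := out = esc_spec_symbols_alt row_list
instance (row_list : List String) (out : List String) : Decidable (Spec_esc_spec_symbols row_list out) := by unfold Spec_esc_spec_symbols; infer_instance

-- ===== CLAIM (what is proved, stated in full; the proofs are below) =====
def Claim_equal_esc_spec_symbols : Prop := ∀ (row_list : List String), Dom_esc_spec_symbols row_list → Spec_esc_spec_symbols row_list (esc_spec_symbols row_list)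

-- ===== LEMMAS AND PROOFS =====

-- escaping one symbol c functionally: each occurrence of c gets a backslash
def esc1 (c x : Char) : List Char := if x = c then ['\\', x] else [x]

theorem flatMap_esc1_of_not_mem (c : Char) (l : List Char) (h : c ∉ l) :
    l.flatMap (esc1 c) = l := by
  induction l with
  | nil => rfl
  | cons a t ih =>
    simp only [List.mem_cons, not_or] at h
    simp [esc1, Ne.symm h.1, ih h.2]

theorem singleton_infix_iff (c : Char) (l : List Char) : [c] <:+: l ↔ c ∈ l := by
  constructor
  · intro h; exact h.mem (List.mem_singleton_self c)
  · intro h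
    obtain ⟨s, t, rfl⟩ := List.append_of_mem h
    exact ⟨s, t, by simp⟩

theorem escLoopA_not_found (c : Char) (fuel : Nat) (pre rest : List Char) (h : c ∉ rest) :
    escLoopA (fuel + 1) [c] (pre ++ rest) pre.length = pre ++ rest := by
  rw [escLoopA]
  rw [PySem.Chars.findFrom_natCast _ _ pre.length (by simp), List.drop_left]
  have hf : PySem.Chars.find rest [c] = -1 :=
    (PySem.Chars.find_eq_neg_one_iff _ _).mpr (fun hin => h ((singleton_infix_iff c rest).mp hin))
  simp [hf]

theorem escLoopA_eq (c : Char) : ∀ (fuel : Nat) (rest : List Char), rest.length < fuel →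
    ∀ (pre : List Char),
    escLoopA fuel [c] (pre ++ rest) pre.length = pre ++ rest.flatMap (esc1 c) := by
  intro fuel
  induction fuel with
  | zero => intro rest hr; omega
  | succ n ih =>
    intro rest hr pre
    by_cases hmem : c ∈ rest
    case neg =>
      rw [escLoopA_not_found c n pre rest hmem, flatMap_esc1_of_not_mem c rest hmem]
    case pos =>
      rw [escLoopA]
      rw [PySem.Chars.findFrom_natCast _ _ pre.length (by simp), List.drop_left]
      have hf : PySem.Chars.find rest [c] ≠ -1 :=
        (PySem.Chars.find_ne_neg_one_iff _ _).mpr ((singleton_infix_iff c rest).mpr hmem)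
      have h0 : (0:Int) ≤ PySem.Chars.find rest [c] := by
        have := PySem.Chars.neg_one_le_find rest [c]; omega
      obtain ⟨hpref, hmin⟩ := PySem.Chars.find_spec h0
      set m := (PySem.Chars.find rest [c]).toNat with hm
      have hm_lt : m < rest.length := by
        by_contra hcon
        rw [not_lt] at hcon
        rw [List.drop_eq_nil_of_le hcon] at hpref
        simp at hpref
      have hdrop : rest.drop m = c :: rest.drop (m+1) := by
        obtain ⟨t, ht⟩ := hpref
        have hget : rest.drop m = rest[m] :: rest.drop (m+1) := List.drop_eq_getElem_cons hm_lt
        rw [hget] at ht ⊢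
        simp only [List.singleton_append, List.cons.injEq] at ht
        rw [← ht.1]
      have hnot : c ∉ rest.take m := by
        intro hc
        obtain ⟨i, hi, hgi⟩ := List.getElem_of_mem hc
        have hi' : i < m := by simpa using (lt_of_lt_of_le hi (by simp [List.length_take]))
        have hgi' : rest[i]'(by omega) = c := by
          simpa [List.getElem_take] using hgi
        apply hmin i hi'
        rw [List.drop_eq_getElem_cons (by omega : i < rest.length), hgi']
        exact ⟨rest.drop (i+1), rfl⟩
      rw [if_neg hf]
      rw [if_neg (show ¬((↑pre.length + PySem.Chars.find rest [c] : Int) = -1) by omega)]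
      have hcast : (↑pre.length + PySem.Chars.find rest [c] : Int) = ((pre.length + m : Nat) : Int) := by
        push_cast; omega
      simp only [PySem.List.slice_zero_start]
      rw [hcast, PySem.List.slice_to_natCast, PySem.List.slice_from_natCast, Int.toNat_natCast]
      have harith : pre.length + m - pre.length = m := by omega
      have htake : (pre ++ rest).take (pre.length + m) = pre ++ rest.take m := by
        rw [List.take_append, List.take_of_length_le (by omega), harith]
      have hdrop2 : (pre ++ rest).drop (pre.length + m) = c :: rest.drop (m+1) := by
        rw [List.drop_append, List.drop_eq_nil_of_le (by omega), harith, List.nil_append, hdrop]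
      rw [htake, hdrop2]
      have hlen' : (pre ++ rest.take m ++ ['\\', c]).length = pre.length + m + 2 := by
        simp [List.length_take]
        omega
      have hsplit : rest = rest.take m ++ c :: rest.drop (m+1) := by
        conv_lhs => rw [← List.take_append_drop m rest]
        rw [hdrop]
      calc escLoopA n [c] (pre ++ rest.take m ++ '\\' :: c :: rest.drop (m+1)) (pre.length + m + 2)
          = escLoopA n [c] ((pre ++ rest.take m ++ ['\\', c]) ++ rest.drop (m+1))
              ((pre ++ rest.take m ++ ['\\', c]).length) := by
            rw [hlen']; simp
        _ = (pre ++ rest.take m ++ ['\\', c]) ++ (rest.drop (m+1)).flatMap (esc1 c) := by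
            apply ih
            simp only [List.length_drop]
            omega
        _ = pre ++ rest.flatMap (esc1 c) := by
            conv_rhs => rw [hsplit]
            simp [List.flatMap_append, flatMap_esc1_of_not_mem c _ hnot, esc1]

theorem escLoopA_zero (c : Char) (s : List Char) :
    escLoopA (s.length + 1) [c] s 0 = s.flatMap (esc1 c) :=
  escLoopA_eq c (s.length + 1) s (by omega) []

theorem perChar (x : Char) :
    (((((esc1 '\\' x).flatMap (esc1 '&')).flatMap (esc1 '{')).flatMap (esc1 '}')).flatMap
      (esc1 '#')).flatMap (esc1 '%') = pvTranslate x := by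
  by_cases h1 : x = '\\'
  · subst h1; rfl
  by_cases h2 : x = '&'
  · subst h2; rfl
  by_cases h3 : x = '{'
  · subst h3; rfl
  by_cases h4 : x = '}'
  · subst h4; rfl
  by_cases h5 : x = '#'
  · subst h5; rfl
  by_cases h6 : x = '%'
  · subst h6; rfl
  simp [esc1, pvTranslate, pvSpecials, h1, h2, h3, h4, h5, h6]

theorem chain_eq (s : List Char) :
    [['\\'], ['&'], ['{'], ['}'], ['#'], ['%']].foldl (fun acc sym => escLoopA (acc.length + 1) sym acc 0) s
      = s.flatMap pvTranslate := by
  simp only [List.foldl_cons, List.foldl_nil, escLoopA_zero, List.flatMap_assoc]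
  have hfun : (fun x => (((((esc1 '\\' x).flatMap (esc1 '&')).flatMap (esc1 '{')).flatMap
      (esc1 '}')).flatMap (esc1 '#')).flatMap (esc1 '%')) = pvTranslate := funext perChar
  rw [← hfun]
  simp [List.flatMap_assoc]

-- ===== VERDICT (by name: the statement is the Claim_ definition above) =====
theorem esc_spec_symbols_spec : Claim_equal_esc_spec_symbols := by
  intro row_list _
  unfold Spec_esc_spec_symbols esc_spec_symbols esc_spec_symbols_alt
  simp only [chain_eq]
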